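-- pv_equiv track=rewrite | github.com/vattila7811/prog2-23o-hf05 | stats.py | size_occurance
-- ===== SOURCE A (Python) =====
-- def size_occurance(data: dict[str, dict], keyname: str, threshold: int) -> list[tuple[int, int]]:
--     occurances = {}
--     for albums in data.values():
--         for album in albums.values():
--             try:
--                 size = len(album[keyname])
--                 if size > 0:
--                     if size > threshold: size = threshold
--                     count = occurances.get(size, 0) + 1
--                     occurances[size] = count
--             except KeyError:
--                 pass
--     return sorted([(size, count) for size, count in occurances.items()])
-- ===== SOURCE B (Python) =====
-- def size_occurance(data: dict[str, dict], keyname: str, threshold: int) -> list[tuple[int, int]]: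
--     sizes = sorted(
--         min(len(album[keyname]), threshold)
--         for albums in data.values()
--         for album in albums.values()
--         if keyname in album and len(album[keyname]) > 0
--     )
--     result = []
--     cur, cnt = 0, 0
--     for s in sizes:
--         if cnt > 0 and s == cur:
--             cnt += 1
--         else:
--             if cnt > 0:
--                 result.append((cur, cnt))
--             cur, cnt = s, 1
--     if cnt > 0:
--         result.append((cur, cnt))
--     return result
-- ===== Notes on version B (the rewrite author's own statement) =====
-- stated objective: alternative
-- what changed: B sorts the multiset of capped sizes and run-length-encodes consecutive runs in one linear scan, instead of A's hash-map counter followed by a sort of the (size,count) items.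
import Mathlib
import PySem

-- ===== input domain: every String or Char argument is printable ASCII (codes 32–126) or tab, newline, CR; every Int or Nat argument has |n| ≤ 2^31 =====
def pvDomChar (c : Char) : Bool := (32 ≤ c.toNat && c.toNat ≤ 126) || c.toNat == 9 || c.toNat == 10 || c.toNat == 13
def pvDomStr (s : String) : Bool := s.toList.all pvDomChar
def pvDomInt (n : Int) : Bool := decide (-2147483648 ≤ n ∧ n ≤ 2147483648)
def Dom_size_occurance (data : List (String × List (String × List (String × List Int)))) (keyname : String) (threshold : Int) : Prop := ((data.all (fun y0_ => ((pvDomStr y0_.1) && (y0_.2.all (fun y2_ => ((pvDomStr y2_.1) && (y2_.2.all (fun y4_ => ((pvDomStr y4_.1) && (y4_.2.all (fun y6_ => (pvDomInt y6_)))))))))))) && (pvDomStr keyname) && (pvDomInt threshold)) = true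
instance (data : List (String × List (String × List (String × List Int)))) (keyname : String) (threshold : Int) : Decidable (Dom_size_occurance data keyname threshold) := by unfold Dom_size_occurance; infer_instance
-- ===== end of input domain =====

-- B sorts the multiset of capped sizes and run-length-encodes consecutive runs in one
-- linear scan, instead of A's hash-map counter followed by a sort of the items
-- (objective: alternative algorithm; no speed claim).

-- ===== PORT A =====
-- literal transliteration of Source A: dict counter built over a double loop, then sorted(items)
def size_occurance (data : List (String × List (String × List (String × List Int)))) (keyname : String) (threshold : Int) : List (Int × Int) :=
  let occ : PySem.Dict Int Int := data.foldl (fun occ albums =>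
    albums.2.foldl (fun occ album =>
      match PySem.Dict.get? (PySem.Dict.mk album.2) keyname with
      | none => occ                 -- KeyError → pass
      | some l =>
        let size : Int := (l.length : Int)
        if size > 0 then
          let size := if size > threshold then threshold else size
          let count := occ.getD size 0 + 1
          occ.insert size count
        else occ) occ) PySem.Dict.empty
  PySem.List.sorted2 occ.items Prod.fst Prod.snd

-- ===== PORT B =====
-- the for-loop of Source B: cur/cnt run-length scan; pvRle splits off the cnt = 0 start state
def pvRleAux : List Int → Int → Int → List (Int × Int)
  | [], cur, cnt => [(cur, cnt)]
  | s :: t, cur, cnt => if s = cur then pvRleAux t cur (cnt + 1) else (cur, cnt) :: pvRleAux t s 1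

def pvRle : List Int → List (Int × Int)
  | [] => []
  | s :: t => pvRleAux t s 1

-- literal transliteration of Source B: sorted comprehension of capped sizes, then the run-length loop
def size_occurance_alt (data : List (String × List (String × List (String × List Int)))) (keyname : String) (threshold : Int) : List (Int × Int) :=
  pvRle (PySem.List.sorted
    (data.flatMap (fun albums => albums.2.filterMap (fun album =>
      let d := PySem.Dict.mk album.2
      if d.contains keyname = true ∧ ((d.getD keyname []).length : Int) > 0
      then some (min ((d.getD keyname []).length : Int) threshold) else none)))
    (fun x => x))

-- ===== PRECONDITION & SPEC =====
def Spec_size_occurance (data : List (String × List (String × List (String × List Int)))) (keyname : String) (threshold : Int) (out : List (Int × Int)) : Prop := out = size_occurance_alt data keyname threshold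
instance (data : List (String × List (String × List (String × List Int)))) (keyname : String) (threshold : Int) (out : List (Int × Int)) : Decidable (Spec_size_occurance data keyname threshold out) := by unfold Spec_size_occurance; infer_instance

-- ===== CLAIM (what is proved, stated in full; the proofs are below) =====
def Claim_equal_size_occurance : Prop := ∀ (data : List (String × List (String × List (String × List Int)))) (keyname : String) (threshold : Int), Dom_size_occurance data keyname threshold → Spec_size_occurance data keyname threshold (size_occurance data keyname threshold)

-- ===== LEMMAS AND PROOFS =====

-- the optional capped size one album contributes
def pvExtract? (keyname : String) (threshold : Int) (album : List (String × List Int)) : Option Int :=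
  match PySem.Dict.get? (PySem.Dict.mk album) keyname with
  | none => none
  | some l => if (l.length : Int) > 0 then some (min (l.length : Int) threshold) else none

-- the sequence of capped sizes both programs traverse
def pvEntries (data : List (String × List (String × List (String × List Int)))) (keyname : String) (threshold : Int) : List Int :=
  data.flatMap (fun albums => albums.2.filterMap (fun album => pvExtract? keyname threshold album.2))

lemma contains_eq_isSome (d : PySem.Dict String (List Int)) (k : String) :
    d.contains k = (d.get? k).isSome := by
  simp only [PySem.Dict.contains, PySem.Dict.get?, Option.isSome_map]
  rcases hf : List.find? (fun p => p.1 == k) d.items with _ | x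
  · rw [hf]
    simp only [Option.isSome_none, List.any_eq_false]
    intro p hp
    simpa using List.find?_eq_none.mp hf p hp
  · rw [hf]
    simp only [Option.isSome_some, List.any_eq_true]
    exact ⟨x, List.mem_of_find?_eq_some hf, List.find?_some (p := fun q : String × List Int => q.1 == k) hf⟩

-- A's nested fold is the counter fold over pvEntries
lemma A_fold_eq (data : List (String × List (String × List (String × List Int)))) (keyname : String) (threshold : Int)
    (d : PySem.Dict Int Int) :
    data.foldl (fun occ albums =>
      albums.2.foldl (fun occ album =>
        match PySem.Dict.get? (PySem.Dict.mk album.2) keyname with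
        | none => occ
        | some l =>
          let size : Int := (l.length : Int)
          if size > 0 then
            let size := if size > threshold then threshold else size
            let count := occ.getD size 0 + 1
            occ.insert size count
          else occ) occ) d
    = (pvEntries data keyname threshold).foldl (fun d x => d.insert x (d.getD x 0 + 1)) d := by
  rw [pvEntries, List.foldl_flatMap]
  congr 1
  funext occ albums
  rw [List.foldl_filterMap]
  congr 1
  funext o q
  unfold pvExtract?
  cases hg : PySem.Dict.get? (PySem.Dict.mk q.2) keyname with
  | none => rfl
  | some l =>
    by_cases hpos : ((l.length : Int) > 0)
    · have hmin : (if (l.length : Int) > threshold then threshold else (l.length : Int))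
          = min (l.length : Int) threshold := by
        rw [min_def]; split_ifs <;> omega
      have h2 : 0 < l.length := by omega
      simp [h2, hmin]
    · have h2 : ¬ 0 < l.length := by omega
      simp [h2]

-- B's comprehension collects exactly pvEntries
lemma B_collect_eq (data : List (String × List (String × List (String × List Int)))) (keyname : String) (threshold : Int) :
    data.flatMap (fun albums => albums.2.filterMap (fun album =>
      let d := PySem.Dict.mk album.2
      if d.contains keyname = true ∧ ((d.getD keyname []).length : Int) > 0
      then some (min ((d.getD keyname []).length : Int) threshold) else none))
    = pvEntries data keyname threshold := by
  rw [pvEntries]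
  apply List.flatMap_congr
  intro albums _
  apply List.filterMap_congr
  intro album _
  unfold pvExtract?
  cases hg : PySem.Dict.get? (PySem.Dict.mk album.2) keyname with
  | none =>
    have hc : (PySem.Dict.mk album.2).contains keyname = false := by
      rw [contains_eq_isSome, hg]; rfl
    simp [hc]
  | some l =>
    have hc : (PySem.Dict.mk album.2).contains keyname = true := by
      rw [contains_eq_isSome, hg]; rfl
    have hd : (PySem.Dict.mk album.2).getD keyname [] = l := by
      simp [PySem.Dict.getD, hg]
    simp [hc, hd]

lemma insertBy_congr {α : Type} (f g : α → α → Bool) (x : α) (ys : List α)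
    (h : ∀ b ∈ ys, f x b = g x b) :
    PySem.List.insertBy f x ys = PySem.List.insertBy g x ys := by
  induction ys with
  | nil => rfl
  | cons b t ih =>
    simp only [PySem.List.insertBy]
    rw [h b List.mem_cons_self, ih (fun c hc => h c (List.mem_cons_of_mem _ hc))]

lemma foldl_insertBy_congr {α : Type} (f g : α → α → Bool) (S : List α)
    (hfg : ∀ a ∈ S, ∀ b ∈ S, f a b = g a b) :
    ∀ (xs acc : List α), (∀ x ∈ xs, x ∈ S) → (∀ x ∈ acc, x ∈ S) →
    xs.foldl (fun acc x => PySem.List.insertBy f x acc) acc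
      = xs.foldl (fun acc x => PySem.List.insertBy g x acc) acc := by
  intro xs
  induction xs with
  | nil => intro acc _ _; rfl
  | cons x t ih =>
    intro acc hxs hacc
    simp only [List.foldl_cons]
    have hx : x ∈ S := hxs x List.mem_cons_self
    rw [insertBy_congr f g x acc (fun b hb => hfg x hx b (hacc b hb))]
    exact ih _ (fun y hy => hxs y (List.mem_cons_of_mem _ hy))
      (fun y hy => by
        rcases (PySem.List.mem_insertBy g x y acc).mp hy with h | h
        · exact h ▸ hx
        · exact hacc y h)

-- sorting pairs by Python's lexicographic tuple order equals sorting by fst when fst is injective on the list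
lemma sorted2_eq_sorted_fst (xs : List (Int × Int))
    (hinj : ∀ a ∈ xs, ∀ b ∈ xs, a.1 = b.1 → a = b) :
    PySem.List.sorted2 xs Prod.fst Prod.snd = PySem.List.sorted xs Prod.fst := by
  show xs.foldl (fun acc x => PySem.List.insertBy _ x acc) []
      = xs.foldl (fun acc x => PySem.List.insertBy _ x acc) []
  apply foldl_insertBy_congr _ _ xs _ xs [] (fun x hx => hx) (fun x hx => by cases hx)
  intro a ha b hb
  rcases lt_trichotomy a.1 b.1 with h | h | h
  · simp [h, not_lt_of_gt h]
  · have hab : a = b := hinj a ha b hb h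
    subst hab
    simp
  · simp [h, not_lt_of_gt h]

-- run-length membership: on a sorted tail whose elements all dominate cur,
-- the pairs are (cur, cnt + #cur) and (k, #k) for the other values present
lemma rleAux_mem (L : List Int) : ∀ (cur cnt : Int),
    L.Pairwise (· ≤ ·) → (∀ x ∈ L, cur ≤ x) →
    ∀ p : Int × Int, p ∈ pvRleAux L cur cnt ↔
      p = (cur, cnt + (L.count cur : Int)) ∨
      (p.1 ∈ L ∧ p.1 ≠ cur ∧ p.2 = (L.count p.1 : Int)) := by
  induction L with
  | nil =>
    intro cur cnt _ _ p
    simp [pvRleAux]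
  | cons x t ih =>
    intro cur cnt hsort hcur p
    have hts : t.Pairwise (· ≤ ·) := hsort.of_cons
    have hxt : ∀ y ∈ t, x ≤ y := fun y hy => List.rel_of_pairwise_cons hsort hy
    by_cases hx : x = cur
    · subst hx
      have hstep : pvRleAux (x :: t) x cnt = pvRleAux t x (cnt + 1) := by
        simp [pvRleAux]
      rw [hstep, ih x (cnt + 1) hts hxt p, List.count_cons_self]
      constructor
      · rintro (h | h)
        · left; rw [h]; push_cast; ring_nf
        · right; exact ⟨List.mem_cons_of_mem _ h.1, h.2.1,
            by rw [h.2.2, List.count_cons_of_ne (Ne.symm h.2.1)]⟩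
      · rintro (h | h)
        · left; rw [h]; push_cast; ring_nf
        · rcases List.mem_cons.mp h.1 with he | ht
          · exact absurd he h.2.1
          · right; exact ⟨ht, h.2.1, by rw [h.2.2, List.count_cons_of_ne (Ne.symm h.2.1)]⟩
    · have hcx : cur < x := lt_of_le_of_ne (hcur x List.mem_cons_self) (fun h => hx h.symm)
      have hcnt0 : (x :: t).count cur = 0 := by
        rw [List.count_eq_zero]
        intro hmem
        rcases List.mem_cons.mp hmem with he | ht
        · exact hx he.symm
        · exact absurd (hxt cur ht) (by omega)
      have hne : x ≠ cur := hx
      have hstep : pvRleAux (x :: t) cur cnt = (cur, cnt) :: pvRleAux t x 1 := by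
        simp [pvRleAux, hne]
      rw [hstep]
      simp only [List.mem_cons, ih x 1 hts hxt p]
      constructor
      · rintro (h | h | h)
        · left; rw [h, hcnt0]; simp
        · right
          subst h
          refine ⟨Or.inl rfl, hne, ?_⟩
          show (1 : Int) + (t.count x : Int) = ((x :: t).count x : Int)
          rw [List.count_cons_self]
          push_cast; ring
        · right
          have hcp : cur < p.1 := lt_of_lt_of_le hcx (hxt p.1 h.1)
          refine ⟨Or.inr h.1, by omega, ?_⟩
          rw [h.2.2, List.count_cons_of_ne (Ne.symm h.2.1)]
      · rintro (h | h)
        · left; rw [h, hcnt0]; simp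
        · rcases h.1 with he | ht
          · right; left
            have : p.2 = ((x :: t).count p.1 : Int) := h.2.2
            rw [he] at this
            rw [List.count_cons_self] at this
            have hp : p = (x, ((1 : Int) + (t.count x : Int))) := by
              apply Prod.ext he
              rw [this]; push_cast; ring_nf
            rw [hp]
          · by_cases hpx : p.1 = x
            · right; left
              have : p.2 = ((x :: t).count p.1 : Int) := h.2.2
              rw [hpx, List.count_cons_self] at this
              apply Prod.ext hpx
              rw [this]; push_cast; ring_nf
            · right; right
              exact ⟨ht, hpx, by rw [h.2.2, List.count_cons_of_ne (Ne.symm hpx)]⟩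

-- run-length keys are strictly increasing and dominate cur
lemma rleAux_keys (L : List Int) : ∀ (cur cnt : Int),
    L.Pairwise (· ≤ ·) → (∀ x ∈ L, cur ≤ x) →
    (pvRleAux L cur cnt).Pairwise (fun p q => p.1 < q.1) ∧
    ∀ p ∈ pvRleAux L cur cnt, cur ≤ p.1 := by
  induction L with
  | nil =>
    intro cur cnt _ _
    refine ⟨List.pairwise_singleton _ _, ?_⟩
    intro p hp
    rcases List.mem_singleton.mp hp with rfl
    exact le_refl _
  | cons x t ih =>
    intro cur cnt hsort hcur
    have hts : t.Pairwise (· ≤ ·) := hsort.of_cons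
    have hxt : ∀ y ∈ t, x ≤ y := fun y hy => List.rel_of_pairwise_cons hsort hy
    by_cases hx : x = cur
    · subst hx
      have hstep : pvRleAux (x :: t) x cnt = pvRleAux t x (cnt + 1) := by
        simp [pvRleAux]
      rw [hstep]
      exact ih x (cnt + 1) hts hxt
    · have hcx : cur < x := lt_of_le_of_ne (hcur x List.mem_cons_self) (fun h => hx h.symm)
      have hrec := ih x 1 hts hxt
      have hstep : pvRleAux (x :: t) cur cnt = (cur, cnt) :: pvRleAux t x 1 := by
        simp [pvRleAux, hx]
      rw [hstep]
      constructor
      · exact List.pairwise_cons.mpr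
          ⟨fun q hq => lt_of_lt_of_le hcx (hrec.2 q hq), hrec.1⟩
      · intro p hp
        rcases List.mem_cons.mp hp with he | hm
        · rw [he]
        · exact le_of_lt (lt_of_lt_of_le hcx (hrec.2 p hm))

-- the core identity: sorted items of the counter = run-length encoding of the sorted list
lemma counter_sorted_eq_rle (E : List Int) :
    PySem.List.sorted2 (PySem.Dict.counter E).items Prod.fst Prod.snd
      = pvRle (PySem.List.sorted E (fun x => x)) := by
  rw [PySem.Dict.items_counter]
  rw [sorted2_eq_sorted_fst _ (by
    intro a ha b hb h1
    rcases List.mem_map.mp ha with ⟨k1, _, hk1⟩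
    rcases List.mem_map.mp hb with ⟨k2, _, hk2⟩
    subst hk1; subst hk2
    simp only at h1
    rw [h1])]
  rcases hSc : PySem.List.sorted E (fun x => x) with _ | ⟨s, t⟩
  · have hE : E = [] := (PySem.List.sorted_eq_nil_iff E (fun x => x) false).mp hSc
    subst hE
    rfl
  · have hperm : (s :: t).Perm E := hSc ▸ PySem.List.sorted_perm E (fun x => x) false
    have hpair : (s :: t).Pairwise (· ≤ ·) := by
      have := PySem.List.sorted_pairwise E (fun x => x)
      rw [hSc] at this
      exact this
    have hts : t.Pairwise (· ≤ ·) := hpair.of_cons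
    have hst : ∀ y ∈ t, s ≤ y := fun y hy => List.rel_of_pairwise_cons hpair hy
    have hmemS : ∀ k : Int, k ∈ E ↔ k ∈ s :: t := fun k => (hperm.mem_iff).symm
    have hcountS : ∀ k : Int, E.count k = (s :: t).count k := fun k => (hperm.count_eq k).symm
    have hmem := rleAux_mem t s 1 hts hst
    have hkeys := rleAux_keys t s 1 hts hst
    show PySem.List.sorted ((PySem.Set.ofList E).map (fun k => (k, (E.count k : Int)))) Prod.fst
        = pvRleAux t s 1
    apply PySem.List.sorted_eq_of_perm_of_pairwise_lt
    · apply (List.perm_ext_iff_of_nodup ?_ ?_).mpr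
      · intro p
        rw [hmem p]
        constructor
        · rintro (h | h)
          · refine List.mem_map.mpr ⟨s, (PySem.Set.mem_ofList _ _).mpr
              ((hmemS s).mpr List.mem_cons_self), ?_⟩
            rw [h, hcountS s, List.count_cons_self]
            simp only [Prod.mk.injEq, true_and]
            push_cast; ring_nf
          · refine List.mem_map.mpr ⟨p.1, (PySem.Set.mem_ofList _ _).mpr
              ((hmemS p.1).mpr (List.mem_cons_of_mem _ h.1)), ?_⟩
            rw [hcountS p.1, List.count_cons_of_ne (Ne.symm h.2.1), ← h.2.2]
        · intro hp
          rcases List.mem_map.mp hp with ⟨k, hk, hpk⟩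
          have hkS : k ∈ s :: t := (hmemS k).mp ((PySem.Set.mem_ofList _ _).mp hk)
          by_cases hks : k = s
          · left
            subst hks
            rw [← hpk, hcountS k, List.count_cons_self]
            simp only [Prod.mk.injEq, true_and]
            push_cast; ring_nf
          · right
            rcases List.mem_cons.mp hkS with he | ht
            · exact absurd he hks
            · refine ⟨by rw [← hpk]; exact ht, by rw [← hpk]; exact hks, ?_⟩
              rw [← hpk]
              simp only
              rw [hcountS k, List.count_cons_of_ne (Ne.symm hks)]
      · exact List.Pairwise.imp (fun h heq => absurd (heq ▸ h) (lt_irrefl _)) hkeys.1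
      · exact (PySem.Set.nodup_ofList _).map
          (fun a b hab => congrArg Prod.fst hab)
    · exact hkeys.1

-- ===== VERDICT (by name: the statement is the Claim_ definition above) =====
theorem size_occurance_spec : Claim_equal_size_occurance := by
  intro data keyname threshold _
  simp only [Spec_size_occurance, size_occurance, size_occurance_alt]
  rw [A_fold_eq, PySem.Dict.foldl_insert_getD_add_one_eq_counter, B_collect_eq]
  exact counter_sorted_eq_rle (pvEntries data keyname threshold)
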